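-- pv_equiv track=rewrite | github.com/ChocoWu/Synfue-PAOTE | data/datasets/preprocess.py | sep_pair_idx
-- ===== SOURCE A (Python) =====
-- def sep_discontinuous_term(term_idx):
--     """
--     according to the source term idx, get the new idx, term rep = [start_idx, end_idx] and it is consequent
--     :param term_idx:
--     :return:
--     """
--     bert_idx = []
--     flag = 0  # Whether to include discontinuous terms
--     for idx in term_idx:
--         if len(idx) < 2:
--             if [idx[0], idx[-1]] not in bert_idx:
--                 bert_idx.append([idx[0], idx[-1]])
--         else:
--             if (idx[0] + len(idx) - 1) == idx[-1]:
--                 if [idx[0], idx[-1]] not in bert_idx: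
--                     bert_idx.append([idx[0], idx[-1]])
--             else:
--                 temp_flag = 0
--                 s_idx = e_idx = idx[0]  # start_idx = end_idx
--                 for i in idx[1:]:
--                     if i == e_idx + 1:
--                         e_idx = i
--                     else:
--                         temp_flag = 1
--                         if [s_idx, e_idx] not in bert_idx:
--                             bert_idx.append([s_idx, e_idx])
--                         s_idx = e_idx = i
--                 if [s_idx, e_idx] not in bert_idx:
--                     bert_idx.append([s_idx, e_idx])
--
--                 if temp_flag == 1:
--                     flag += 1
--                     temp_flag = 0
--
--     return bert_idx, flag
--
-- def sep_pair_idx(pair_idx):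
--     """
--     according to the source pair idx, get the new idx, term rep = [[start_idx, end_idx], [start_idx, end_idx]]
--     and it is consequent
--     :param pair_idx:
--     :return:
--     """
--     bert_idx = []
--     flag = a_flag = o_flag = 0
--     for p in pair_idx:
--         bert_a_idx, a_flag = sep_discontinuous_term([p[0]])
--         bert_o_idx, o_flag = sep_discontinuous_term([p[1]])
--         for a in bert_a_idx:
--             for b in bert_o_idx:
--                 bert_idx.append((a, b))
--
--     if a_flag != 0 or o_flag != 0:
--         flag = 1
--     return bert_idx, flag
-- ===== SOURCE B (Python) =====
-- def _runs(idx):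
--     """Split one index list into contiguous [start, end] runs by breakpoint
--     detection over adjacent pairs; flag = 1 iff it split into several runs."""
--     first, last = idx[0], idx[-1]
--     if len(idx) < 2 or first + len(idx) - 1 == last:
--         return [[first, last]], 0
--     adj = list(zip(idx, idx[1:]))
--     starts = [first] + [b for a, b in adj if b != a + 1]
--     ends = [a for a, b in adj if b != a + 1] + [last]
--     segs = []
--     for s, e in zip(starts, ends):
--         if [s, e] not in segs:
--             segs.append([s, e])
--     return segs, (1 if len(starts) > 1 else 0)
--
--
-- def sep_pair_idx(pair_idx):
--     bert_idx = []
--     a_flag = o_flag = 0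
--     for a_idx, o_idx in pair_idx:
--         a_segs, a_flag = _runs(a_idx)
--         o_segs, o_flag = _runs(o_idx)
--         bert_idx.extend((a, b) for a in a_segs for b in o_segs)
--     return bert_idx, (1 if a_flag or o_flag else 0)
-- ===== Notes on version B (the rewrite author's own statement) =====
-- stated objective: idiomatic
-- what changed: Replaces the stateful start/end scanning loop with declarative breakpoint detection over zipped adjacent pairs (starts/ends comprehensions sliced into runs), keeping the outer pair loop; same O(n) cost per term (dedup is quadratic in runs in both).
import Mathlib
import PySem

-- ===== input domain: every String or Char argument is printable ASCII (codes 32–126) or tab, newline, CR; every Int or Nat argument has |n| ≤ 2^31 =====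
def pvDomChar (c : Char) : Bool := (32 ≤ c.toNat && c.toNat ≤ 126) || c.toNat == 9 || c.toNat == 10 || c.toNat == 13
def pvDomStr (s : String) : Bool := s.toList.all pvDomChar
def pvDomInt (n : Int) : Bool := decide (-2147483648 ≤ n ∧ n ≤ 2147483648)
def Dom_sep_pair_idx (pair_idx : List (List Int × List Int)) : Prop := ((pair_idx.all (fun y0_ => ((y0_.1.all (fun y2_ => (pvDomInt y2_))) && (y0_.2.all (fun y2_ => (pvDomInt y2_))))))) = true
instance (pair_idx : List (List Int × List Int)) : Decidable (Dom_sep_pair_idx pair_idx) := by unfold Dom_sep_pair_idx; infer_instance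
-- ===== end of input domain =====

-- B replaces A's stateful run-scanning loop with breakpoint detection over
-- zipped adjacent pairs (idiomatic slicing into runs); same outer pair loop.


-- ===== PORT A =====
-- shared dedup-append: "if x not in b: b.append(x)" (identical in both Pythons)
def dpush (b : List (List Int)) (x : List Int) : List (List Int) :=
  if x ∈ b then b else b ++ [x]

def sep_discontinuous_term (term_idx : List (List Int)) : List (List Int) × Int :=
  term_idx.foldl (fun acc idx =>
    let bert := acc.1
    let flag := acc.2
    let h := idx.headD 0      -- idx[0]; Pre_ excludes empty idx (Python raises IndexError)
    let t := idx.getLastD 0   -- idx[-1]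
    if idx.length < 2 then
      (dpush bert [h, t], flag)
    else if h + (idx.length : Int) - 1 = t then
      (dpush bert [h, t], flag)
    else
      let st := (idx.drop 1).foldl
        (fun (st : Int × Int × Int × List (List Int)) i =>
          if i = st.2.2.1 + 1 then (st.1, st.2.1, i, st.2.2.2)
          else (1, i, i, dpush st.2.2.2 [st.2.1, st.2.2.1]))
        (0, h, h, bert)
      (dpush st.2.2.2 [st.2.1, st.2.2.1], if st.1 = 1 then flag + 1 else flag))
    ([], 0)

def sep_pair_idx (pair_idx : List (List Int × List Int)) : (List (List Int × List Int)) × Int :=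
  let st := pair_idx.foldl
    (fun (st : List (List Int × List Int) × Int × Int) p =>
      let ra := sep_discontinuous_term [p.1]
      let ro := sep_discontinuous_term [p.2]
      (ra.1.foldl (fun acc a => ro.1.foldl (fun acc2 b => acc2 ++ [(a, b)]) acc) st.1,
       ra.2, ro.2))
    ([], 0, 0)
  (st.1, if st.2.1 ≠ 0 ∨ st.2.2 ≠ 0 then 1 else 0)

-- ===== PORT B =====
def altRuns (idx : List Int) : List (List Int) × Int :=
  let first := idx.headD 0    -- idx[0]; Pre_ excludes empty idx
  let last := idx.getLastD 0  -- idx[-1]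
  if idx.length < 2 ∨ first + (idx.length : Int) - 1 = last then
    ([[first, last]], 0)
  else
    let adj := idx.zip (idx.drop 1)
    let brks := adj.filter (fun ab => ab.2 ≠ ab.1 + 1)
    let starts := first :: brks.map (·.2)
    let ends := brks.map (·.1) ++ [last]
    let segs := (starts.zip ends).foldl (fun o se => dpush o [se.1, se.2]) []
    (segs, if 1 < starts.length then 1 else 0)

def sep_pair_idx_alt (pair_idx : List (List Int × List Int)) : (List (List Int × List Int)) × Int :=
  let st := pair_idx.foldl
    (fun (st : List (List Int × List Int) × Int × Int) p =>
      let ra := altRuns p.1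
      let ro := altRuns p.2
      (st.1 ++ ra.1.flatMap (fun a => ro.1.map (fun b => (a, b))), ra.2, ro.2))
    ([], 0, 0)
  (st.1, if st.2.1 ≠ 0 ∨ st.2.2 ≠ 0 then 1 else 0)

-- ===== PRECONDITION & SPEC =====
-- Pre_ excludes exactly the inputs containing an empty index list: there
-- Python A raises IndexError at idx[0] (and B raises likewise).
def Pre_sep_pair_idx (pair_idx : List (List Int × List Int)) : Prop :=
  ∀ p ∈ pair_idx, p.1 ≠ [] ∧ p.2 ≠ []
instance (pair_idx : List (List Int × List Int)) : Decidable (Pre_sep_pair_idx pair_idx) := by unfold Pre_sep_pair_idx; infer_instance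

def pvWitness_sep_pair_idx : (List (List Int × List Int)) := [([1, 2, 5], [7]), ([3], [0, 2, 3])]

def Spec_sep_pair_idx (pair_idx : List (List Int × List Int)) (out : (List (List Int × List Int)) × Int) : Prop := out = sep_pair_idx_alt pair_idx
instance (pair_idx : List (List Int × List Int)) (out : (List (List Int × List Int)) × Int) : Decidable (Spec_sep_pair_idx pair_idx out) := by unfold Spec_sep_pair_idx; infer_instance

-- ===== CLAIM (what is proved, stated in full; the proofs are below) =====
def Claim_equal_sep_pair_idx : Prop := ∀ (pair_idx : List (List Int × List Int)), Dom_sep_pair_idx pair_idx → Pre_sep_pair_idx pair_idx → Spec_sep_pair_idx pair_idx (sep_pair_idx pair_idx)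

-- ===== LEMMAS AND PROOFS =====

-- Reference run decomposition: contiguous segments of (s..e) ++ t, front to back.
def goRuns (s e : Int) : List Int → List (List Int)
  | [] => [[s, e]]
  | i :: t => if i = e + 1 then goRuns s i t else [s, e] :: goRuns i i t

lemma goRuns_ne_nil (s e : Int) (t : List Int) : goRuns s e t ≠ [] := by
  induction t generalizing s e with
  | nil => simp [goRuns]
  | cons i t ih => simp only [goRuns]; split <;> simp [ih]

-- A's inner scanning loop computes the dedup-fold of goRuns, and its
-- temp_flag records whether more than one segment was produced.
lemma innerA_eq (t : List Int) (tf s e : Int) (b : List (List Int)) :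
    (let st := t.foldl
      (fun (st : Int × Int × Int × List (List Int)) i =>
        if i = st.2.2.1 + 1 then (st.1, st.2.1, i, st.2.2.2)
        else (1, i, i, dpush st.2.2.2 [st.2.1, st.2.2.1]))
      (tf, s, e, b)
     (dpush st.2.2.2 [st.2.1, st.2.2.1], st.1)) =
    ((goRuns s e t).foldl dpush b,
     if 1 < (goRuns s e t).length then 1 else tf) := by
  induction t generalizing tf s e b with
  | nil => simp [goRuns]
  | cons i t ih =>
    simp only [goRuns, List.foldl_cons]
    by_cases h : i = e + 1
    · subst h
      simpa using ih tf s (e + 1) b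
    · simp only [if_neg h, ih, List.foldl_cons]
      have hne := goRuns_ne_nil i i t
      cases hg : goRuns i i t with
      | nil => exact absurd hg hne
      | cons r rs =>
        have h2 : 1 < rs.length + 2 := by omega
        simp [ite_self, h2]

-- B's breakpoint/zip construction yields exactly goRuns.
lemma segsZ_eq (t : List Int) (s e : Int) :
    ((s :: (((e :: t).zip t).filter (fun ab => ab.2 ≠ ab.1 + 1)).map (·.2)).zip
       ((((e :: t).zip t).filter (fun ab => ab.2 ≠ ab.1 + 1)).map (·.1) ++ [t.getLastD e])).map
      (fun se => [se.1, se.2]) = goRuns s e t := by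
  induction t generalizing s e with
  | nil => simp [goRuns]
  | cons i t ih =>
    simp only [goRuns, List.zip_cons_cons, List.filter_cons]
    by_cases h : i = e + 1
    · rw [if_pos h]
      have hd : (decide (i ≠ e + 1)) = false := by simp [h]
      simpa [hd, List.getLastD_cons, List.getLast?_cons] using ih s i
    · rw [if_neg h]
      have hd : (decide (i ≠ e + 1)) = true := by simp [h]
      simp only [hd, if_pos, List.map_cons, List.zip_cons_cons, List.getLastD_cons]
      simpa using ih i i

lemma starts_len (t : List Int) (s e : Int) :
    (1 < (s :: (((e :: t).zip t).filter (fun ab => ab.2 ≠ ab.1 + 1)).map (·.2)).length) ↔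
    (1 < (goRuns s e t).length) := by
  induction t generalizing s e with
  | nil => simp [goRuns]
  | cons i t ih =>
    simp only [goRuns, List.zip_cons_cons, List.filter_cons]
    by_cases h : i = e + 1
    · rw [if_pos h]
      have hd : (decide (i ≠ e + 1)) = false := by simp [h]
      simpa [hd] using ih s i
    · rw [if_neg h]
      have hd : (decide (i ≠ e + 1)) = true := by simp [h]
      simp only [hd, if_pos, List.map_cons, List.length_cons]
      have hne := goRuns_ne_nil i i t
      cases hg : goRuns i i t with
      | nil => exact absurd hg hne
      | cons r rs => simp

-- fold of dedup over a segment list, starting from []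
-- (both sides after the bridge lemmas)

-- fold the dedup over a mapped zip = dedup-fold over the mapped list
lemma foldl_dpush_zip (L : List (Int × Int)) (acc : List (List Int)) :
    L.foldl (fun o se => dpush o [se.1, se.2]) acc
      = (L.map (fun se => [se.1, se.2])).foldl dpush acc := by
  rw [List.foldl_map]

-- per-term agreement on nonempty index lists
lemma sdt_single (idx : List Int) (h : idx ≠ []) :
    sep_discontinuous_term [idx] = altRuns idx := by
  match idx, h with
  | x :: xs, _ =>
  cases xs with
  | nil => simp [sep_discontinuous_term, altRuns, dpush]
  | cons y ys =>
    have hseg := segsZ_eq (y :: ys) x x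
    have hlen := starts_len (y :: ys) x x
    rw [List.getLastD_cons] at hseg
    simp only [sep_discontinuous_term, altRuns, List.foldl_cons, List.foldl_nil,
      List.headD_cons, List.getLastD_cons, List.drop_succ_cons, List.drop_zero]
    have hlen2 : ¬ ((x :: y :: ys).length < 2) := by simp
    by_cases hc : (x : Int) + ((x :: y :: ys).length : Int) - 1 = ys.getLastD y
    · rw [if_neg hlen2, if_pos hc, if_pos (Or.inr hc)]
      simp [dpush]
    · have hor : ¬ ((x :: y :: ys).length < 2 ∨
          (x : Int) + ((x :: y :: ys).length : Int) - 1 = ys.getLastD y) := by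
        push_neg
        exact ⟨by simp, hc⟩
      rw [if_neg hlen2, if_neg hc, if_neg hor, foldl_dpush_zip, hseg]
      by_cases hy : y = x + 1
      · subst hy
        have hA := innerA_eq ys 0 x (x + 1) []
        have h1 := congrArg Prod.fst hA
        have h2 := congrArg Prod.snd hA
        simp only at h1 h2
        simp only [if_true]
        have hg : goRuns x x ((x + 1) :: ys) = goRuns x (x + 1) ys := by
          simp [goRuns]
        rw [hg] at hlen ⊢
        rw [h1]
        refine Prod.ext rfl ?_
        simp only [h2]
        by_cases hl : 1 < (goRuns x (x + 1) ys).length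
        · rw [if_pos hl, if_pos (hlen.mpr hl)]
          norm_num
        · rw [if_neg hl, if_neg (fun hh => hl (hlen.mp hh))]
          norm_num
      · have hA := innerA_eq ys 1 y y (dpush [] [x, x])
        have h1 := congrArg Prod.fst hA
        have h2 := congrArg Prod.snd hA
        simp only at h1 h2
        simp only [if_neg hy]
        have hg : goRuns x x (y :: ys) = [x, x] :: goRuns y y ys := by
          simp [goRuns, hy]
        rw [hg] at hlen ⊢
        rw [List.foldl_cons, h1]
        refine Prod.ext rfl ?_
        simp only [h2, ite_self]
        have hgt : 1 < ([x, x] :: goRuns y y ys).length := by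
          have := goRuns_ne_nil y y ys
          cases hgg : goRuns y y ys with
          | nil => exact absurd hgg this
          | cons r rs => simp
        rw [if_pos (hlen.mpr hgt)]
        norm_num

-- nested append loops build the cross product
lemma cross_fold (ba bo : List (List Int)) (acc : List (List Int × List Int)) :
    ba.foldl (fun acc a => bo.foldl (fun acc2 b => acc2 ++ [(a, b)]) acc) acc
      = acc ++ ba.flatMap (fun a => bo.map (fun b => (a, b))) := by
  induction ba generalizing acc with
  | nil => simp
  | cons a t ih =>
    rw [List.foldl_cons, PySem.List.foldl_append_singleton_eq_map, ih, List.flatMap_cons,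
      List.append_assoc]

-- the two outer folds agree from any start state (per-pair steps agree)
lemma outer_fold (l : List (List Int × List Int)) (hp : ∀ p ∈ l, p.1 ≠ [] ∧ p.2 ≠ [])
    (st : List (List Int × List Int) × Int × Int) :
    l.foldl (fun (st : List (List Int × List Int) × Int × Int) p =>
      let ra := sep_discontinuous_term [p.1]
      let ro := sep_discontinuous_term [p.2]
      (ra.1.foldl (fun acc a => ro.1.foldl (fun acc2 b => acc2 ++ [(a, b)]) acc) st.1,
       ra.2, ro.2)) st
    = l.foldl (fun (st : List (List Int × List Int) × Int × Int) p =>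
      let ra := altRuns p.1
      let ro := altRuns p.2
      (st.1 ++ ra.1.flatMap (fun a => ro.1.map (fun b => (a, b))), ra.2, ro.2)) st := by
  induction l generalizing st with
  | nil => rfl
  | cons p t ih =>
    have hp1 := (hp p (List.mem_cons_self)).1
    have hp2 := (hp p (List.mem_cons_self)).2
    simp only [List.foldl_cons, sdt_single p.1 hp1, sdt_single p.2 hp2, cross_fold]
    have ih' := ih (fun q hq => hp q (List.mem_cons_of_mem _ hq))
    simp only [cross_fold] at ih'
    exact ih' _

-- ===== VERDICT (by name: the statement is the Claim_ definition above) =====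
theorem sep_pair_idx_spec : Claim_equal_sep_pair_idx := by
  intro pair_idx _ hpre
  show sep_pair_idx pair_idx = sep_pair_idx_alt pair_idx
  simp only [sep_pair_idx, sep_pair_idx_alt]
  rw [outer_fold pair_idx hpre]
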